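-- pv_equiv track=rewrite | github.com/claytondaley/DaleyKlippings | table.py | hyphen_range
-- ===== SOURCE A (Python) =====
-- def hyphen_range(s, range_indicator='-'):
--     """ Takes a range in form of "a-b" and generate a list of numbers between a and b inclusive.
--     Also accepts comma separated ranges like "a-b,c-d,f" will build a list which will include
--     Numbers from a to b, a to d and f """
--     if s is None:
--         return []
--     s = u''.join(s.split())  #removes white space
--     r = set()
--     for x in s.split(','):
--         t = x.split(range_indicator)
--         if len(t) not in [1, 2]: raise SyntaxError(
--             "hash_range is given its argument as %s which seems not correctly formatted." % s)
--         # To support ranges like 2014-52 which really mean 2014-2052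
--         if len(t) == 2 and len(t[0]) > len(t[1]):
--             t[1] = t[0][:(len(t[0]) - len(t[1]))] + t[1]
--         r.add(int(t[0])) if len(t) == 1 else r.update(set(range(int(t[0]), int(t[1]) + 1)))
--     l = list(r)
--     l.sort()
--     return l
-- ===== SOURCE B (Python) =====
-- def hyphen_range(s, range_indicator='-'):
--     """ Same result as the original, but built from intervals: each token becomes a
--     (lo, hi) pair, empty ranges are dropped, the pairs are sorted by lo, and a single
--     sweep emits the sorted unique integers using the output's last element as a cursor. """
--     if s is None:
--         return []
--     s = u''.join(s.split())  #removes white space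
--     intervals = []
--     for x in s.split(','):
--         t = x.split(range_indicator)
--         if len(t) not in [1, 2]: raise SyntaxError(
--             "hash_range is given its argument as %s which seems not correctly formatted." % s)
--         if len(t) == 1:
--             lo = hi = int(t[0])
--         else:
--             # To support ranges like 2014-52 which really mean 2014-2052
--             if len(t[0]) > len(t[1]):
--                 t[1] = t[0][:(len(t[0]) - len(t[1]))] + t[1]
--             lo, hi = int(t[0]), int(t[1])
--         if lo <= hi:
--             intervals.append((lo, hi))
--     intervals.sort(key=lambda p: p[0])
--     out = []
--     for lo, hi in intervals:
--         if out and lo <= out[-1]: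
--             lo = out[-1] + 1
--         out.extend(range(lo, hi + 1))
--     return out
-- ===== Notes on version B (the rewrite author's own statement) =====
-- stated objective: alternative
-- what changed: Instead of unioning every individual integer into a set and sorting it, B maps each token to a (lo,hi) interval, drops empty intervals, sorts the intervals by their lower end, and expands them in one sweep that uses the output's last element as a deduplication cursor, emitting the sorted unique list directly.
import Mathlib
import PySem

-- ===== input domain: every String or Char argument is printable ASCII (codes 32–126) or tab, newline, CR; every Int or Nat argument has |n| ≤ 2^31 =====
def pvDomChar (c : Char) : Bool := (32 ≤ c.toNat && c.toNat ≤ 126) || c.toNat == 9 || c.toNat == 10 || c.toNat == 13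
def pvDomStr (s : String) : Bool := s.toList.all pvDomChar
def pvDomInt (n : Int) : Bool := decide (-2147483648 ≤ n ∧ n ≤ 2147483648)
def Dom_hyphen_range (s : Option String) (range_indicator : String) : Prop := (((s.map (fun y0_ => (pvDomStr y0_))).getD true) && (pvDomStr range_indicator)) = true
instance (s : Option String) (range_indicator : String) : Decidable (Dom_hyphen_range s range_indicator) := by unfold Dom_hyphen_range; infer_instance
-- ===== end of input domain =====

-- B replaces A's "union every integer into a set, then sort" by "map each token to an
-- interval, sort the nonempty intervals by their lower end, expand them in one sweep
-- using the output's last element as a deduplication cursor" (objective: alternative).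

-- int(t) with the 0 fallback never taken inside Pre_ (Pre_ demands every token parse)
def pvInt (cs : List Char) : Int := (PySem.Int.ofChars? cs).getD 0

-- ===== PORT A =====
def hyphen_range (s : Option String) (range_indicator : String) : List Int :=
  match s with
  | none => []
  | some str =>
    let s := PySem.Chars.join [] (PySem.Chars.split₀ str.toList)  -- u''.join(s.split())
    let r : PySem.Set Int := (PySem.Chars.splitOn s [',']).foldl (fun r x =>
        let t := (PySem.Chars.split? x range_indicator.toList).getD [x]
        -- len(t) not in [1, 2] raises SyntaxError in Python: such inputs are outside Pre_
        if t.length == 1 then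
          PySem.Set.add r (pvInt (t.getD 0 []))
        else
          let t0 := t.getD 0 []
          let t1 := t.getD 1 []
          let t1 := if t0.length > t1.length then t0.take (t0.length - t1.length) ++ t1 else t1
          PySem.Set.update r (PySem.List.pyRange (pvInt t0) (pvInt t1 + 1))
      ) PySem.Set.empty
    PySem.List.sorted r (fun v => v) false

-- ===== PORT B =====
def hyphen_range_alt (s : Option String) (range_indicator : String) : List Int :=
  match s with
  | none => []
  | some str =>
    let s := PySem.Chars.join [] (PySem.Chars.split₀ str.toList)  -- u''.join(s.split())
    let intervals : List (Int × Int) := (PySem.Chars.splitOn s [',']).foldl (fun acc x =>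
        let t := (PySem.Chars.split? x range_indicator.toList).getD [x]
        -- len(t) not in [1, 2] raises SyntaxError in Python: such inputs are outside Pre_
        let p : Int × Int :=
          if t.length == 1 then
            let v := pvInt (t.getD 0 [])
            (v, v)
          else
            let t0 := t.getD 0 []
            let t1 := t.getD 1 []
            let t1 := if t0.length > t1.length then t0.take (t0.length - t1.length) ++ t1 else t1
            (pvInt t0, pvInt t1)
        if p.1 ≤ p.2 then acc ++ [p] else acc
      ) []
    (PySem.List.sorted intervals (fun p => p.1) false).foldl (fun out p =>
        let lo :=
          match out.getLast? with
          | some m => if p.1 ≤ m then m + 1 else p.1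
          | none => p.1
        out ++ PySem.List.pyRange lo (p.2 + 1)
      ) []

-- ===== PRECONDITION & SPEC =====
-- one token is well formed iff it has one or two parts and each part (after A's
-- prefix-pad of a short right end) parses as a Python int
def pvTokOK (ri : List Char) (x : List Char) : Bool :=
  let t := (PySem.Chars.split? x ri).getD [x]
  if t.length == 1 then
    (PySem.Int.ofChars? (t.getD 0 [])).isSome
  else if t.length == 2 then
    let t0 := t.getD 0 []
    let t1 := t.getD 1 []
    let t1 := if t0.length > t1.length then t0.take (t0.length - t1.length) ++ t1 else t1
    (PySem.Int.ofChars? t0).isSome && (PySem.Int.ofChars? t1).isSome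
  else false

-- Pre_ holds exactly where Python A returns: s is None, or the separator is nonempty
-- (splitting on an empty separator raises ValueError in Python) and every comma token is well formed (otherwise A
-- raises SyntaxError resp. ValueError from int()).
def Pre_hyphen_range (s : Option String) (range_indicator : String) : Prop :=
  match s with
  | none => True
  | some str =>
    range_indicator ≠ "" ∧
    ∀ x ∈ PySem.Chars.splitOn (PySem.Chars.join [] (PySem.Chars.split₀ str.toList)) [','],
      pvTokOK range_indicator.toList x = true

instance (s : Option String) (range_indicator : String) : Decidable (Pre_hyphen_range s range_indicator) := by
  unfold Pre_hyphen_range; cases s <;> infer_instance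

def pvWitness_hyphen_range : Option String × String := (some "1-3, 7,2014-52", "-")

def Spec_hyphen_range (s : Option String) (range_indicator : String) (out : List Int) : Prop := out = hyphen_range_alt s range_indicator
instance (s : Option String) (range_indicator : String) (out : List Int) : Decidable (Spec_hyphen_range s range_indicator out) := by unfold Spec_hyphen_range; infer_instance

-- ===== CLAIM (what is proved, stated in full; the proofs are below) =====
def Claim_equal_hyphen_range : Prop := ∀ (s : Option String) (range_indicator : String), Dom_hyphen_range s range_indicator → Pre_hyphen_range s range_indicator → Spec_hyphen_range s range_indicator (hyphen_range s range_indicator)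

-- ===== LEMMAS AND PROOFS =====

-- the (lo, hi) interval a token denotes (B's per-token computation, named for the proof)
def pvIv (ri : List Char) (x : List Char) : Int × Int :=
  let t := (PySem.Chars.split? x ri).getD [x]
  if t.length == 1 then
    let v := pvInt (t.getD 0 [])
    (v, v)
  else
    let t0 := t.getD 0 []
    let t1 := t.getD 1 []
    let t1 := if t0.length > t1.length then t0.take (t0.length - t1.length) ++ t1 else t1
    (pvInt t0, pvInt t1)

theorem pvRange_singleton (v : Int) : PySem.List.pyRange v (v + 1) = [v] := by
  simp [PySem.List.pyRange_one]

-- A's loop body, expressed through pvIv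
theorem pvA_fold_eq (ri : List Char) (toks : List (List Char)) (r : PySem.Set Int) :
    toks.foldl (fun r x =>
        let t := (PySem.Chars.split? x ri).getD [x]
        if t.length == 1 then
          PySem.Set.add r (pvInt (t.getD 0 []))
        else
          let t0 := t.getD 0 []
          let t1 := t.getD 1 []
          let t1 := if t0.length > t1.length then t0.take (t0.length - t1.length) ++ t1 else t1
          PySem.Set.update r (PySem.List.pyRange (pvInt t0) (pvInt t1 + 1))) r
    = (toks.map (pvIv ri)).foldl
        (fun r p => PySem.Set.update r (PySem.List.pyRange p.1 (p.2 + 1))) r := by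
  rw [List.foldl_map]
  refine PySem.List.foldl_congr_mem _ _ _ _ (fun acc x _ => ?_)
  simp only [pvIv]
  split
  · rw [pvRange_singleton]; rfl
  · rfl

theorem pvSetFold_mem (ivs : List (Int × Int)) (r : PySem.Set Int) (y : Int) :
    (y ∈ ivs.foldl (fun r p => PySem.Set.update r (PySem.List.pyRange p.1 (p.2 + 1))) r)
    ↔ y ∈ r ∨ ∃ p ∈ ivs, p.1 ≤ y ∧ y ≤ p.2 := by
  induction ivs generalizing r with
  | nil => simp
  | cons p rest ih =>
    rw [List.foldl_cons, ih]
    simp only [PySem.Set.mem_update, PySem.List.mem_pyRange_one, List.mem_cons]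
    constructor
    · rintro ((h | h) | ⟨q, hq, h1, h2⟩)
      · exact Or.inl h
      · exact Or.inr ⟨p, Or.inl rfl, h.1, by omega⟩
      · exact Or.inr ⟨q, Or.inr hq, h1, h2⟩
    · rintro (h | ⟨q, (rfl | hq), h1, h2⟩)
      · exact Or.inl (Or.inl h)
      · exact Or.inl (Or.inr ⟨h1, by omega⟩)
      · exact Or.inr ⟨q, hq, h1, h2⟩

theorem pvSetFold_nodup (ivs : List (Int × Int)) (r : PySem.Set Int) (hr : r.Nodup) :
    (ivs.foldl (fun r p => PySem.Set.update r (PySem.List.pyRange p.1 (p.2 + 1))) r).Nodup := by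
  induction ivs generalizing r with
  | nil => exact hr
  | cons p rest ih => exact ih _ (PySem.Set.nodup_update _ _ hr)

-- last element of a strictly sorted list bounds every element
theorem pvLast_max (out : List Int) (h : out.Pairwise (· < ·)) :
    ∀ y ∈ out, ∀ m ∈ out.getLast?, y ≤ m := by
  induction out with
  | nil => simp
  | cons a t ih =>
    intro y hy m hm
    match t, hm with
    | [], hm =>
      simp only [List.getLast?_singleton, Option.mem_some_iff] at hm
      simp only [List.mem_singleton] at hy
      omega
    | b :: t', hm =>
      rw [List.getLast?_cons_cons] at hm
      have hmem : m ∈ b :: t' := List.mem_of_getLast? hm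
      rcases List.mem_cons.mp hy with rfl | hy
      · exact le_of_lt ((List.pairwise_cons.mp h).1 m hmem)
      · exact ih (List.pairwise_cons.mp h).2 y hy m hm

theorem pvRange_nil {a b : Int} (h : b ≤ a) : PySem.List.pyRange a b = [] := by
  have h0 : (b - a).toNat = 0 := by omega
  simp [PySem.List.pyRange_one, h0]

-- one step of B's sweep: what appending the next interval's fresh part preserves
theorem pvStep (out : List Int) (p : Int × Int) (lo : Int)
    (hlo : lo = (match out.getLast? with
                 | some m => if p.1 ≤ m then m + 1 else p.1
                 | none => p.1))
    (hple : p.1 ≤ p.2) (hout : out.Pairwise (· < ·))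
    (hcovp : ∀ y, p.1 ≤ y → (∃ m, out.getLast? = some m ∧ y ≤ m) → y ∈ out) :
    (out ++ PySem.List.pyRange lo (p.2 + 1)).Pairwise (· < ·)
    ∧ (∀ y, y ∈ out ++ PySem.List.pyRange lo (p.2 + 1) ↔ y ∈ out ∨ (p.1 ≤ y ∧ y ≤ p.2))
    ∧ (∀ y, p.1 ≤ y →
        (∃ m, (out ++ PySem.List.pyRange lo (p.2 + 1)).getLast? = some m ∧ y ≤ m) →
        y ∈ out ++ PySem.List.pyRange lo (p.2 + 1)) := by
  rcases h : out.getLast? with _ | m <;> rw [h] at hlo <;> simp only [] at hlo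
  · -- out is empty: the emitted range is the whole interval
    have hnil : out = [] := List.getLast?_eq_none_iff.mp h
    subst hnil; subst hlo
    refine ⟨by simpa using PySem.List.pairwise_lt_pyRange_one p.1 (p.2 + 1), ?_, ?_⟩
    · intro y; rw [List.nil_append, PySem.List.mem_pyRange_one]
      constructor
      · rintro ⟨h1, h2⟩; exact Or.inr ⟨h1, by omega⟩
      · rintro (h | ⟨h1, h2⟩); · cases h
        exact ⟨h1, by omega⟩
    · intro y hy ⟨m', hm', hym'⟩
      rw [List.nil_append] at hm' ⊢
      rw [PySem.List.pyRange_one_succ_right (by omega : p.1 ≤ p.2), List.getLast?_append] at hm'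
      simp only [List.getLast?_singleton] at hm'
      cases hm'
      rw [PySem.List.mem_pyRange_one]; exact ⟨hy, by omega⟩
  · -- out is nonempty with last (= greatest) element m
    have hlo_ge : p.1 ≤ lo := by rw [hlo]; split <;> omega
    have hlo_gt : m < lo := by rw [hlo]; split <;> omega
    have hlt : ∀ y ∈ out, y < lo := fun y hy =>
      lt_of_le_of_lt (pvLast_max out hout y hy m h) hlo_gt
    have hmem : ∀ y, y ∈ out ++ PySem.List.pyRange lo (p.2 + 1) ↔
        y ∈ out ∨ (p.1 ≤ y ∧ y ≤ p.2) := by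
      intro y
      rw [List.mem_append, PySem.List.mem_pyRange_one]
      constructor
      · rintro (hin | hin)
        · exact Or.inl hin
        · exact Or.inr ⟨le_trans hlo_ge hin.1, by omega⟩
      · rintro (hin | ⟨h1, h2⟩)
        · exact Or.inl hin
        · by_cases hym : y ≤ m
          · exact Or.inl (hcovp y h1 ⟨m, h, hym⟩)
          · refine Or.inr ⟨?_, by omega⟩; rw [hlo]; split <;> omega
    refine ⟨?_, hmem, ?_⟩
    · rw [List.pairwise_append]
      refine ⟨hout, PySem.List.pairwise_lt_pyRange_one lo (p.2 + 1), fun a ha b hb => ?_⟩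
      have hbl : lo ≤ b := (PySem.List.mem_pyRange_one.mp hb).1
      have := hlt a ha; omega
    · intro y hy ⟨m', hm', hym'⟩
      by_cases hle2 : lo ≤ p.2
      · rw [PySem.List.pyRange_one_succ_right hle2, ← List.append_assoc, List.getLast?_append]
          at hm'
        simp only [List.getLast?_singleton] at hm'
        cases hm'
        exact (hmem y).mpr (Or.inr ⟨hy, by omega⟩)
      · have hpm : p.1 ≤ m := by
          by_contra hc
          have : lo = p.1 := by rw [hlo]; split <;> omega
          omega
        have hnil : PySem.List.pyRange lo (p.2 + 1) = [] := pvRange_nil (by omega)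
        rw [hnil, List.append_nil] at hm' ⊢
        exact hcovp y hy ⟨m', hm', hym'⟩

-- the sweep: invariant-carrying characterisation of B's second loop
theorem pvSweep_spec (L : List (Int × Int)) (out : List Int)
    (hle : ∀ p ∈ L, p.1 ≤ p.2)
    (hs : L.Pairwise (fun p q => p.1 ≤ q.1))
    (hout : out.Pairwise (· < ·))
    (hcov : ∀ p ∈ L, ∀ y, p.1 ≤ y → (∃ m, out.getLast? = some m ∧ y ≤ m) → y ∈ out) :
    (L.foldl (fun out p =>
        let lo :=
          match out.getLast? with
          | some m => if p.1 ≤ m then m + 1 else p.1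
          | none => p.1
        out ++ PySem.List.pyRange lo (p.2 + 1)) out).Pairwise (· < ·)
    ∧ ∀ y, (y ∈ L.foldl (fun out p =>
        let lo :=
          match out.getLast? with
          | some m => if p.1 ≤ m then m + 1 else p.1
          | none => p.1
        out ++ PySem.List.pyRange lo (p.2 + 1)) out)
        ↔ y ∈ out ∨ ∃ p ∈ L, p.1 ≤ y ∧ y ≤ p.2 := by
  induction L generalizing out with
  | nil => exact ⟨hout, fun y => by simp⟩
  | cons p rest ih =>
    obtain ⟨hp, hrest⟩ := List.pairwise_cons.mp hs
    have hple : p.1 ≤ p.2 := hle p (List.mem_cons_self ..)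
    obtain ⟨hPW, hMEM, hCOV⟩ :=
      pvStep out p _ rfl hple hout
        (fun y hy hex => hcov p (List.mem_cons_self ..) y hy hex)
    rw [List.foldl_cons]
    obtain ⟨rPW, rMEM⟩ :=
      ih _ (fun q hq => hle q (List.mem_cons_of_mem _ hq)) hrest hPW
        (fun q hq y hy hex => hCOV y (le_trans (hp q hq) hy) hex)
    refine ⟨rPW, fun y => ?_⟩
    rw [rMEM y, hMEM y]
    constructor
    · rintro ((h | h) | ⟨q, hq, h⟩)
      · exact Or.inl h
      · exact Or.inr ⟨p, List.mem_cons_self .., h⟩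
      · exact Or.inr ⟨q, List.mem_cons_of_mem _ hq, h⟩
    · rintro (h | ⟨q, hq, h⟩)
      · exact Or.inl (Or.inl h)
      · rcases List.mem_cons.mp hq with rfl | hq
        · exact Or.inl (Or.inr h)
        · exact Or.inr ⟨q, hq, h⟩

-- B's first loop collects exactly the nonempty token intervals
theorem pvB_fold_eq (ri : List Char) (toks : List (List Char)) :
    toks.foldl (fun acc x =>
        let t := (PySem.Chars.split? x ri).getD [x]
        let p : Int × Int :=
          if t.length == 1 then
            let v := pvInt (t.getD 0 [])
            (v, v)
          else
            let t0 := t.getD 0 []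
            let t1 := t.getD 1 []
            let t1 := if t0.length > t1.length then t0.take (t0.length - t1.length) ++ t1 else t1
            (pvInt t0, pvInt t1)
        if p.1 ≤ p.2 then acc ++ [p] else acc) ([] : List (Int × Int))
    = (toks.filter (fun x => decide ((pvIv ri x).1 ≤ (pvIv ri x).2))).map (pvIv ri) := by
  exact PySem.List.foldl_append_ite (fun x => (pvIv ri x).1 ≤ (pvIv ri x).2) (pvIv ri) toks []

-- the two results agree for an arbitrary token list (the shared parsing prefix)
theorem pvMain (ri : List Char) (toks : List (List Char)) :
    PySem.List.sorted
      ((toks.map (pvIv ri)).foldl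
        (fun r p => PySem.Set.update r (PySem.List.pyRange p.1 (p.2 + 1))) PySem.Set.empty)
      (fun v => v) false
    = (PySem.List.sorted
        ((toks.filter (fun x => decide ((pvIv ri x).1 ≤ (pvIv ri x).2))).map (pvIv ri))
        (fun p => p.1) false).foldl (fun out p =>
        let lo :=
          match out.getLast? with
          | some m => if p.1 ≤ m then m + 1 else p.1
          | none => p.1
        out ++ PySem.List.pyRange lo (p.2 + 1)) [] := by
  set ivs0 := (toks.filter (fun x => decide ((pvIv ri x).1 ≤ (pvIv ri x).2))).map (pvIv ri)
    with hivs0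
  set L := PySem.List.sorted ivs0 (fun p => p.1) false with hL
  have hLmem : ∀ p, p ∈ L ↔ p ∈ ivs0 := fun p => (PySem.List.sorted_perm ivs0 _ false).mem_iff
  have hle : ∀ p ∈ L, p.1 ≤ p.2 := by
    intro p hp
    obtain ⟨x, hx, rfl⟩ := List.mem_map.mp ((hLmem p).mp hp)
    exact of_decide_eq_true (List.mem_filter.mp hx).2
  obtain ⟨resPW, resMEM⟩ :=
    pvSweep_spec L [] hle (PySem.List.sorted_pairwise ivs0 (fun p => p.1))
      List.Pairwise.nil (fun p _ y _ hex => by obtain ⟨m, hm, _⟩ := hex; cases hm)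
  refine PySem.List.sorted_eq_of_perm_of_pairwise_lt _ _ _ ?_ resPW
  refine (List.perm_ext_iff_of_nodup (resPW.imp fun h => ne_of_lt h)
    (pvSetFold_nodup _ _ List.nodup_nil)).mpr fun y => ?_
  rw [resMEM y, pvSetFold_mem]
  simp only [List.not_mem_nil, false_or]
  constructor
  · rintro ⟨p, hp, h1, h2⟩
    obtain ⟨x, hx, rfl⟩ := List.mem_map.mp ((hLmem p).mp hp)
    exact ⟨pvIv ri x, List.mem_map_of_mem (List.mem_of_mem_filter hx), h1, h2⟩
  · rintro ⟨p, hp, h1, h2⟩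
    obtain ⟨x, hx, rfl⟩ := List.mem_map.mp hp
    refine ⟨pvIv ri x, (hLmem _).mpr (List.mem_map_of_mem ?_), h1, h2⟩
    exact List.mem_filter.mpr ⟨hx, decide_eq_true (by omega)⟩

-- ===== VERDICT (by name: the statement is the Claim_ definition above) =====
theorem hyphen_range_spec : Claim_equal_hyphen_range := by
  intro s ri _ _
  unfold Spec_hyphen_range
  cases s with
  | none => rfl
  | some str =>
    simp only [hyphen_range, hyphen_range_alt]
    rw [pvA_fold_eq, pvB_fold_eq]
    exact pvMain ri.toList _
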